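-- pv_equiv track=rewrite | github.com/utsav3/Python-Coding-Practice | Boggle_GUI/PyQt_GUI.py | check_grid_word
-- ===== SOURCE A (Python) =====
-- def check_grid_word(word, row, col, input_grid):
--     if word == '':
--         return True
--     elif row<0 or row>=4 or col<0 or col>=4 or word[:1] != input_grid[row][col]:
--         return False
--     else:
--         char = input_grid[row][col]
--         input_grid[row][col] = '*'
--         rest = word[1:len(word)]
--         result = check_grid_word(rest, row-1, col-1, input_grid) \
--             or check_grid_word(rest, row-1, col, input_grid)   \
--             or check_grid_word(rest, row-1, col+1, input_grid) \
--             or check_grid_word(rest, row, col-1, input_grid)   \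
--             or check_grid_word(rest, row, col+1, input_grid)   \
--             or check_grid_word(rest, row+1, col-1, input_grid) \
--             or check_grid_word(rest, row+1, col, input_grid)   \
--             or check_grid_word(rest, row+1, col+1, input_grid) \
--
--         input_grid[row][col] = char
--         return result
-- ===== SOURCE B (Python) =====
-- def check_grid_word(word, row, col, input_grid):
--     if word == '':
--         return True
--     stack = [(word, row, col, frozenset())]
--     while stack:
--         w, r, c, visited = stack.pop()
--         if r < 0 or r >= 4 or c < 0 or c >= 4:
--             continue
--         if (r, c) in visited:
--             continue
--         if input_grid[r][c] != w[0]: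
--             continue
--         if len(w) == 1:
--             return True
--         rest = w[1:]
--         seen = visited | {(r, c)}
--         for dr in (-1, 0, 1):
--             for dc in (-1, 0, 1):
--                 if dr or dc:
--                     stack.append((rest, r + dr, c + dc, seen))
--     return False
-- ===== Notes on version B (the rewrite author's own statement) =====
-- stated objective: alternative
-- what changed: Recursive backtracking that temporarily mutates the grid (writing a '*' sentinel and restoring it) is replaced by an iterative DFS with an explicit stack of (remaining word, row, col, visited-set) frames over the untouched grid.
-- outside the precondition, e.g. on check_grid_word('a', 0, 0, [['a']]): A returns True, B returns True
import Mathlib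
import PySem

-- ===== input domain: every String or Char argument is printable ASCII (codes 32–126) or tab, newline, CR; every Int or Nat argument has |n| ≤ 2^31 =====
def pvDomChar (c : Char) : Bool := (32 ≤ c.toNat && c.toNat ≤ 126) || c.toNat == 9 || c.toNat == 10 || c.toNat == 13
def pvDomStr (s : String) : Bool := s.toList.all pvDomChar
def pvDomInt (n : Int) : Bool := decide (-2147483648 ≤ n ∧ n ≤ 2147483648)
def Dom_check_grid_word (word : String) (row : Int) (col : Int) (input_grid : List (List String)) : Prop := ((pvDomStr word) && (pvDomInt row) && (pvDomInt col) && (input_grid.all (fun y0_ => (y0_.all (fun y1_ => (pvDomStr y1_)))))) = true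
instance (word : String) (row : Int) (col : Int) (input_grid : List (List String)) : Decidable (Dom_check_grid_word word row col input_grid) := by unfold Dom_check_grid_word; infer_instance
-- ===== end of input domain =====

-- B replaces A's recursive backtracking with in-place '*' marking by an iterative explicit-stack
-- DFS with a per-path visited set over the untouched grid (A restores the grid, so A has no net
-- mutation either); equivalence is proved on Pre_, which excludes grids that may make A raise and
-- words containing A's '*' sentinel.


-- shared tiny helper: the two-step indexing input_grid[r][c] (none = IndexError on either step)
def pvCell (g : List (List String)) (r c : Int) : Option String :=
  (PySem.List.pyGet? g r).bind fun rowL => PySem.List.pyGet? rowL c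

-- ===== PORT A =====
-- the in-place assignment input_grid[row][col] := v (A only performs it after pvCell returned some)
def pvSetCell (g : List (List String)) (r c : Int) (v : String) : List (List String) :=
  ((PySem.List.pyGet? g r).map fun rowL =>
    PySem.List.pySetD g r (PySem.List.pySetD rowL c v)).getD g

-- A's recursion on the word (as List Char); A restores the cell before returning, so passing the
-- marked grid g' only to the recursive calls and answering with `result` is the same state A sees.
def pvGoA : List Char → Int → Int → List (List String) → Bool
  | [], _, _, _ => true
  | ch :: rest, row, col, g =>
    if row < 0 ∨ 4 ≤ row ∨ col < 0 ∨ 4 ≤ col then false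
    else
      match pvCell g row col with
      | none => false  -- Python raises IndexError here; Pre_ excludes these inputs
      | some cell =>
        if String.ofList [ch] ≠ cell then false
        else
          let g' := pvSetCell g row col "*"
          (pvGoA rest (row-1) (col-1) g' || pvGoA rest (row-1) col g' || pvGoA rest (row-1) (col+1) g' ||
           pvGoA rest row (col-1) g' || pvGoA rest row (col+1) g' ||
           pvGoA rest (row+1) (col-1) g' || pvGoA rest (row+1) col g' || pvGoA rest (row+1) (col+1) g')

def check_grid_word (word : String) (row : Int) (col : Int) (input_grid : List (List String)) : Bool :=
  pvGoA word.toList row col input_grid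

-- ===== PORT B =====
-- stack measure for termination of the DFS loop
def pvStackM : List (List Char × Int × Int × List (Int × Int)) → Nat
  | [] => 0
  | f :: S => 9 ^ f.1.length + pvStackM S

-- the while-loop of Source B; the list head is the top of the Python stack (stack.pop() takes the last
-- element, so the eight frames appended for dr,dc = (-1,-1)..(1,1) are explored in reverse order)
def pvLoopB (g : List (List String)) : List (List Char × Int × Int × List (Int × Int)) → Bool
  | [] => false
  | ([], _, _, _) :: S => pvLoopB g S  -- unreachable: Source B never pushes an empty word
  | (ch :: rest, r, c, vis) :: S =>
    if r < 0 ∨ 4 ≤ r ∨ c < 0 ∨ 4 ≤ c then pvLoopB g S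
    else if (r, c) ∈ vis then pvLoopB g S
    else if pvCell g r c ≠ some (String.ofList [ch]) then pvLoopB g S
    else if rest = [] then true
    else pvLoopB g
      ((rest, r+1, c+1, (r,c)::vis) :: (rest, r+1, c, (r,c)::vis) :: (rest, r+1, c-1, (r,c)::vis) ::
       (rest, r, c+1, (r,c)::vis) :: (rest, r, c-1, (r,c)::vis) ::
       (rest, r-1, c+1, (r,c)::vis) :: (rest, r-1, c, (r,c)::vis) :: (rest, r-1, c-1, (r,c)::vis) :: S)
  termination_by S => pvStackM S
  decreasing_by
  all_goals simp [pvStackM, pow_succ]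
  all_goals (have h9 : 0 < 9 ^ rest.length := Nat.pow_pos (by norm_num); omega)

def check_grid_word_alt (word : String) (row : Int) (col : Int) (input_grid : List (List String)) : Bool :=
  if word.toList = [] then true
  else pvLoopB input_grid [(word.toList, row, col, ([] : List (Int × Int)))]

-- ===== PRECONDITION & SPEC =====
-- Pre_ excludes (a) inputs on which Python A raises IndexError, and two kinds of inputs A returns
-- on: (b) grids not covering the full 4×4 board on which the search happens to stay on existing
-- cells (which smaller grids avoid the IndexError depends on the search path, not a closed form),
-- and (c) words containing '*' once a matching search starts, on which A's in-place '*' sentinel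
-- can accidentally match already-visited cells — an artefact of A's mutation no caller would rely on.
def Pre_check_grid_word (word : String) (row : Int) (col : Int) (input_grid : List (List String)) : Prop :=
  word = "" ∨ row < 0 ∨ 4 ≤ row ∨ col < 0 ∨ 4 ≤ col ∨
  (pvCell input_grid row col ≠ none ∧
   pvCell input_grid row col ≠ some (String.ofList (word.toList.take 1))) ∨
  ((∀ ch ∈ word.toList, ch ≠ '*') ∧ 4 ≤ input_grid.length ∧
   ∀ l ∈ input_grid.take 4, 4 ≤ l.length)

instance (word : String) (row : Int) (col : Int) (input_grid : List (List String)) : Decidable (Pre_check_grid_word word row col input_grid) := by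
  unfold Pre_check_grid_word; infer_instance

def pvWitness_check_grid_word : String × Int × Int × List (List String) := ("", 0, 0, [])

def Spec_check_grid_word (word : String) (row : Int) (col : Int) (input_grid : List (List String)) (out : Bool) : Prop := out = check_grid_word_alt word row col input_grid
instance (word : String) (row : Int) (col : Int) (input_grid : List (List String)) (out : Bool) : Decidable (Spec_check_grid_word word row col input_grid out) := by unfold Spec_check_grid_word; infer_instance

-- ===== CLAIM (what is proved, stated in full; the proofs are below) =====
def Claim_equal_check_grid_word : Prop := ∀ (word : String) (row : Int) (col : Int) (input_grid : List (List String)), Dom_check_grid_word word row col input_grid → Pre_check_grid_word word row col input_grid → Spec_check_grid_word word row col input_grid (check_grid_word word row col input_grid)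

-- ===== LEMMAS AND PROOFS =====

-- self-avoiding search, the common denominator of both ports (proof-only helper)
def pvSearch (g : List (List String)) : List Char → Int → Int → List (Int × Int) → Bool
  | [], _, _, _ => true
  | ch :: rest, r, c, vis =>
    !(decide (r < 0 ∨ 4 ≤ r ∨ c < 0 ∨ 4 ≤ c)) &&
    !(decide ((r, c) ∈ vis)) &&
    (pvCell g r c == some (String.ofList [ch])) &&
    (pvSearch g rest (r+1) (c+1) ((r,c)::vis) || pvSearch g rest (r+1) c ((r,c)::vis) || pvSearch g rest (r+1) (c-1) ((r,c)::vis) ||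
     pvSearch g rest r (c+1) ((r,c)::vis) || pvSearch g rest r (c-1) ((r,c)::vis) ||
     pvSearch g rest (r-1) (c+1) ((r,c)::vis) || pvSearch g rest (r-1) c ((r,c)::vis) || pvSearch g rest (r-1) (c-1) ((r,c)::vis))

-- h is g with exactly the visited cells overwritten by "*"
def pvMaskRel (g h : List (List String)) (vis : List (Int × Int)) : Prop :=
  ∀ r c : Int, 0 ≤ r → r < 4 → 0 ≤ c → c < 4 →
    pvCell h r c = if (r, c) ∈ vis then (pvCell g r c).map (fun _ => "*") else pvCell g r c

theorem pvStr_one_eq (ch d : Char) : (String.ofList [ch] = String.ofList [d]) ↔ ch = d := by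
  rw [String.ofList_inj]
  simp

theorem pvCell_setCell (h : List (List String)) (r c : Int) (v cell : String)
    (hr : 0 ≤ r) (hc : 0 ≤ c) (hcell : pvCell h r c = some cell) :
    ∀ r' c' : Int, 0 ≤ r' → 0 ≤ c' →
      pvCell (pvSetCell h r c v) r' c' = if r' = r ∧ c' = c then some v else pvCell h r' c' := by
  intro r' c' hr' hc'
  obtain ⟨rowL, hgr, hgc⟩ : ∃ rowL, PySem.List.pyGet? h r = some rowL ∧
      PySem.List.pyGet? rowL c = some cell := by
    unfold pvCell at hcell
    cases hx : PySem.List.pyGet? h r with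
    | none => rw [hx] at hcell; simp at hcell
    | some rowL => rw [hx] at hcell; simp at hcell; exact ⟨rowL, rfl, hcell⟩
  have hrlen : r.toNat < h.length := by
    rw [PySem.List.pyGet?_of_nonneg h hr] at hgr
    exact (List.getElem?_eq_some_iff.mp hgr).1
  have hclen : c.toNat < rowL.length := by
    rw [PySem.List.pyGet?_of_nonneg rowL hc] at hgc
    exact (List.getElem?_eq_some_iff.mp hgc).1
  rw [PySem.List.pyGet?_of_nonneg h hr] at hgr
  rw [PySem.List.pyGet?_of_nonneg rowL hc] at hgc
  unfold pvCell pvSetCell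
  rw [PySem.List.pyGet?_of_nonneg h hr, hgr]
  simp only [Option.map_some, Option.getD_some]
  rw [PySem.List.pySetD_of_nonneg rowL v hc, PySem.List.pySetD_of_nonneg h _ hr]
  rw [PySem.List.pyGet?_of_nonneg _ hr']
  by_cases hrr : r' = r
  · subst hrr
    rw [List.getElem?_set_self (by omega)]
    simp only [Option.bind_some]
    by_cases hcc : c' = c
    · subst hcc
      simp only [and_self, if_true]
      rw [PySem.List.pyGet?_of_nonneg _ hc, List.getElem?_set_self (by omega)]
    · simp only [hcc, and_false, if_false]
      rw [PySem.List.pyGet?_of_nonneg _ hc', List.getElem?_set_ne (by omega : c.toNat ≠ c'.toNat)]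
      rw [PySem.List.pyGet?_of_nonneg h hr, hgr]
      simp only [Option.bind_some]
      rw [PySem.List.pyGet?_of_nonneg _ hc']
  · rw [List.getElem?_set_ne (by omega : r.toNat ≠ r'.toNat)]
    simp only [hrr, false_and, if_false]
    rw [PySem.List.pyGet?_of_nonneg _ hr']

theorem pvGoA_eq_search (g : List (List String)) :
    ∀ (w : List Char) (r c : Int) (h : List (List String)) (vis : List (Int × Int)),
      (∀ ch ∈ w, ch ≠ '*') → pvMaskRel g h vis →
      pvGoA w r c h = pvSearch g w r c vis := by
  intro w
  induction w with
  | nil => intro r c h vis _ _; simp [pvGoA, pvSearch]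
  | cons ch rest IH =>
    intro r c h vis hstar hmr
    have hch : ch ≠ '*' := hstar ch (by simp)
    have hrest : ∀ d ∈ rest, d ≠ '*' := fun d hd => hstar d (by simp [hd])
    by_cases hb : r < 0 ∨ 4 ≤ r ∨ c < 0 ∨ 4 ≤ c
    · simp [pvGoA, pvSearch, hb]
    · have hmask := hmr r c (by omega) (by omega) (by omega) (by omega)
      by_cases hv : (r, c) ∈ vis
      · rw [if_pos hv] at hmask
        cases hcg : pvCell g r c with
        | none =>
          have hh : pvCell h r c = none := by rw [hmask, hcg]; rfl
          simp [pvGoA, pvSearch, hb, hv, hh]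
        | some cell0 =>
          have hh : pvCell h r c = some "*" := by rw [hmask, hcg]; rfl
          have hne : String.ofList [ch] ≠ "*" := by
            intro hcontr
            exact hch ((pvStr_one_eq ch '*').mp hcontr)
          simp [pvGoA, pvSearch, hb, hv, hh, hne]
      · rw [if_neg hv] at hmask
        cases hcg : pvCell g r c with
        | none =>
          have hh : pvCell h r c = none := by rw [hmask, hcg]
          simp [pvGoA, pvSearch, hb, hv, hh, hcg]
        | some cell =>
          have hh : pvCell h r c = some cell := by rw [hmask, hcg]
          by_cases hm : String.ofList [ch] = cell
          · have hmr' : pvMaskRel g (pvSetCell h r c "*") ((r, c) :: vis) := by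
              intro r' c' h1 h2 h3 h4
              rw [pvCell_setCell h r c "*" cell (by omega) (by omega) hh r' c' h1 h3]
              by_cases heq : r' = r ∧ c' = c
              · obtain ⟨e1, e2⟩ := heq; subst e1; subst e2
                simp [hcg]
              · have hmem : ((r', c') ∈ (r, c) :: vis) ↔ ((r', c') ∈ vis) := by
                  simp only [List.mem_cons, Prod.mk.injEq]
                  constructor
                  · rintro (⟨e1, e2⟩ | hmem2)
                    · exact absurd ⟨e1, e2⟩ heq
                    · exact hmem2
                  · exact Or.inr
                rw [if_neg heq, hmr r' c' h1 h2 h3 h4]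
                by_cases hv' : (r', c') ∈ vis
                · rw [if_pos hv', if_pos (hmem.mpr hv')]
                · rw [if_neg hv', if_neg (fun hmem2 => hv' (hmem.mp hmem2))]
            have hL : pvGoA (ch :: rest) r c h =
                (pvSearch g rest (r-1) (c-1) ((r,c)::vis) || pvSearch g rest (r-1) c ((r,c)::vis) ||
                 pvSearch g rest (r-1) (c+1) ((r,c)::vis) || pvSearch g rest r (c-1) ((r,c)::vis) ||
                 pvSearch g rest r (c+1) ((r,c)::vis) || pvSearch g rest (r+1) (c-1) ((r,c)::vis) ||
                 pvSearch g rest (r+1) c ((r,c)::vis) || pvSearch g rest (r+1) (c+1) ((r,c)::vis)) := by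
              simp only [pvGoA, if_neg hb, hh]
              rw [if_neg (by simp [hm] : ¬ (String.ofList [ch] ≠ cell))]
              rw [IH (r-1) (c-1) _ _ hrest hmr', IH (r-1) c _ _ hrest hmr',
                  IH (r-1) (c+1) _ _ hrest hmr', IH r (c-1) _ _ hrest hmr',
                  IH r (c+1) _ _ hrest hmr', IH (r+1) (c-1) _ _ hrest hmr',
                  IH (r+1) c _ _ hrest hmr', IH (r+1) (c+1) _ _ hrest hmr']
            have hR : pvSearch g (ch :: rest) r c vis =
                (pvSearch g rest (r+1) (c+1) ((r,c)::vis) || pvSearch g rest (r+1) c ((r,c)::vis) ||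
                 pvSearch g rest (r+1) (c-1) ((r,c)::vis) || pvSearch g rest r (c+1) ((r,c)::vis) ||
                 pvSearch g rest r (c-1) ((r,c)::vis) || pvSearch g rest (r-1) (c+1) ((r,c)::vis) ||
                 pvSearch g rest (r-1) c ((r,c)::vis) || pvSearch g rest (r-1) (c-1) ((r,c)::vis)) := by
              simp [pvSearch, hb, hv, hcg, hm]
            rw [hL, hR]
            simp [Bool.or_comm, Bool.or_left_comm]
          · have hbeq : (pvCell g r c == some (String.ofList [ch])) = false := by
              simp [hcg]; intro e; exact hm e.symm
            simp [pvGoA, pvSearch, hb, hv, hh, hm, hbeq]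

theorem pvLoopB_eq_any (g : List (List String)) :
    ∀ S, pvLoopB g S = S.any (fun f => decide (f.1 ≠ []) && pvSearch g f.1 f.2.1 f.2.2.1 f.2.2.2) := by
  intro S
  fun_induction pvLoopB g S with
  | case1 => simp
  | case2 r c vis S IH => simp [IH]
  | case3 ch rest r c vis S hb IH =>
    simp [IH, pvSearch, hb]
  | case4 ch rest r c vis S hb hv IH =>
    simp [IH, pvSearch, hb, hv]
  | case5 ch rest r c vis S hb hv hcell IH =>
    simp [IH, pvSearch, hb, hv, hcell]
  | case6 ch r c vis S hb hv hcell =>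
    have hc : pvCell g r c = some (String.ofList [ch]) := not_not.mp hcell
    simp [pvSearch, hb, hv, hc]
  | case7 ch rest r c vis S hb hv hcell hrest IH =>
    rw [IH]
    simp only [List.any_cons]
    have hc : pvCell g r c = some (String.ofList [ch]) := not_not.mp hcell
    simp [pvSearch, hb, hv, hc, hrest, Bool.or_assoc]

-- ===== VERDICT (by name: the statement is the Claim_ definition above) =====
theorem check_grid_word_spec : Claim_equal_check_grid_word := by
  intro word row col g _ hpre
  unfold Spec_check_grid_word check_grid_word check_grid_word_alt
  cases hw : word.toList with
  | nil => simp [pvGoA]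
  | cons ch rest =>
    have hBeq : pvLoopB g [(ch :: rest, row, col, ([] : List (Int × Int)))]
        = pvSearch g (ch :: rest) row col [] := by
      rw [pvLoopB_eq_any]
      simp
    rw [if_neg (by simp), hBeq]
    rcases hpre with h0 | h1 | h2 | h3 | h4 | ⟨hex, hmm⟩ | ⟨hstar, _⟩
    · exfalso
      have hnil : word.toList = [] := by rw [h0]; rfl
      rw [hw] at hnil; exact List.cons_ne_nil ch rest hnil
    · have hb : row < 0 ∨ 4 ≤ row ∨ col < 0 ∨ 4 ≤ col := by omega
      simp [pvGoA, pvSearch, hb]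
    · have hb : row < 0 ∨ 4 ≤ row ∨ col < 0 ∨ 4 ≤ col := by omega
      simp [pvGoA, pvSearch, hb]
    · have hb : row < 0 ∨ 4 ≤ row ∨ col < 0 ∨ 4 ≤ col := by omega
      simp [pvGoA, pvSearch, hb]
    · have hb : row < 0 ∨ 4 ≤ row ∨ col < 0 ∨ 4 ≤ col := by omega
      simp [pvGoA, pvSearch, hb]
    · rw [hw] at hmm
      have hmm' : pvCell g row col ≠ some (String.ofList [ch]) := by simpa using hmm
      by_cases hb : row < 0 ∨ 4 ≤ row ∨ col < 0 ∨ 4 ≤ col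
      · simp [pvGoA, pvSearch, hb]
      · cases hcg : pvCell g row col with
        | none => exact absurd hcg hex
        | some cell =>
          have hm : String.ofList [ch] ≠ cell := fun e => hmm' (by rw [hcg, e])
          have hbeq : (pvCell g row col == some (String.ofList [ch])) = false := by
            simp [hcg]; exact fun e => hm e.symm
          simp [pvGoA, pvSearch, hb, hcg, hm, Ne.symm hm]
    · have hA := pvGoA_eq_search g (ch :: rest) row col g []
      rw [hw] at hstar
      exact hA hstar (by intro r' c' _ _ _ _; simp)
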